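-- pv_equiv track=rewrite | github.com/edend85/Test-Port-1 | Exercise #6/main.py | calculate_eol_packages
-- ===== SOURCE A (Python) =====
-- def calculate_eol_packages(service_entity,relate_entity_identifier,all_EOL_frameworks):
--     framework_for_entity = service_entity.get("relations", {}).get(relate_entity_identifier,[]) #all the framework from specific entity
--     eol_packages_count = 0 # reseting the number of pakages so the previous number won't calcluate
--
--     # counting packages marked as EOL
--     for FOE in framework_for_entity:
--         for EOLframework in all_EOL_frameworks:
--             if FOE == EOLframework['identifier']:
--                 eol_packages_count += 1
--     return eol_packages_count
-- ===== SOURCE B (Python) =====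
-- def _runs(xs):
--     # run-length encode an already-sorted list: [(value, multiplicity), ...]
--     runs = []
--     cur = None
--     cnt = 0
--     for x in xs:
--         if cnt and x == cur:
--             cnt += 1
--         else:
--             if cnt:
--                 runs.append((cur, cnt))
--             cur, cnt = x, 1
--     if cnt:
--         runs.append((cur, cnt))
--     return runs
--
--
-- def _merge_count(r1, r2):
--     # two-pointer merge over two run lists with strictly increasing keys:
--     # equal keys contribute the product of their multiplicities
--     total = 0
--     i = j = 0
--     while i < len(r1) and j < len(r2):
--         v1, c1 = r1[i]
--         v2, c2 = r2[j]
--         if v1 < v2: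
--             i += 1
--         elif v2 < v1:
--             j += 1
--         else:
--             total += c1 * c2
--             i += 1
--             j += 1
--     return total
--
--
-- def calculate_eol_packages(service_entity, relate_entity_identifier, all_EOL_frameworks):
--     framework_for_entity = service_entity.get("relations", {}).get(relate_entity_identifier, [])
--     if not framework_for_entity:
--         return 0
--     eol_ids = sorted(e['identifier'] for e in all_EOL_frameworks)
--     r1 = _runs(sorted(framework_for_entity))
--     r2 = _runs(eol_ids)
--     return _merge_count(r1, r2)
-- ===== Notes on version B (the rewrite author's own statement) =====
-- stated objective: alternative
-- what changed: Replaces the nested quadratic scan with sort + run-length encoding of both sides and a two-pointer merge that adds the product of multiplicities at each common key.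
import Mathlib
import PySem

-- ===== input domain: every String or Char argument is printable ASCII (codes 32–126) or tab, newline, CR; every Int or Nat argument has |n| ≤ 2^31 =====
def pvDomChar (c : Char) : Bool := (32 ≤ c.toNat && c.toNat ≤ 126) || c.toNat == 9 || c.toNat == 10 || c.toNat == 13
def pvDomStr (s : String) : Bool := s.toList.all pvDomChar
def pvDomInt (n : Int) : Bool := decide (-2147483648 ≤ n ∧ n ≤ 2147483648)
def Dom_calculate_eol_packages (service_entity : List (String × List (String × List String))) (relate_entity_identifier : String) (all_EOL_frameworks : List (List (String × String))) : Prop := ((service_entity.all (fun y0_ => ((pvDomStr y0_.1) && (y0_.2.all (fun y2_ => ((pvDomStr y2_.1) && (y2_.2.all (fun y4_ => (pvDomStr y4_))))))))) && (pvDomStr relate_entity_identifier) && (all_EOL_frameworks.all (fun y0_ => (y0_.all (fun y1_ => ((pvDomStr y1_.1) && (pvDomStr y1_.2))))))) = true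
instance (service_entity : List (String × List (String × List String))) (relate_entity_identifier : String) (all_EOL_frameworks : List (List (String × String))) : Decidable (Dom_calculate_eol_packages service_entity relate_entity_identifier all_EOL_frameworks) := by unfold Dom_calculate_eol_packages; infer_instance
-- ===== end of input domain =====

-- B replaces A's nested scan by sort + run-length encoding of both lists and a two-pointer
-- merge adding the product of multiplicities at each common key (objective: alternative).

-- dict .get(k) on an association-list dict (both Pythons use .get for the two relation lookups)
def pvLookup {b : Type} (l : List (String × b)) (k : String) : Option b := (PySem.Dict.mk l).get? k

-- ===== PORT A =====
def calculate_eol_packages (service_entity : List (String × List (String × List String))) (relate_entity_identifier : String) (all_EOL_frameworks : List (List (String × String))) : Int :=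
  let framework_for_entity := (pvLookup ((pvLookup service_entity "relations").getD []) relate_entity_identifier).getD []
  framework_for_entity.foldl (fun acc foe =>
    all_EOL_frameworks.foldl (fun acc2 eol =>
      match pvLookup eol "identifier" with
      | some v => if foe = v then acc2 + 1 else acc2
      | none => acc2) acc) 0
  -- the 'none' branch is a KeyError in Python A; Pre_ below excludes inputs reaching it

-- ===== PORT B =====
-- _runs: the for-loop carrying (cur, cnt) becomes structural recursion on the list with the same state
def pvRunsGo (cur : String) (cnt : Int) : List String → List (String × Int)
  | [] => [(cur, cnt)]
  | x :: xs => if x = cur then pvRunsGo cur (cnt + 1) xs else (cur, cnt) :: pvRunsGo x 1 xs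

def pvRuns : List String → List (String × Int)
  | [] => []
  | x :: xs => pvRunsGo x 1 xs

-- _merge_count: the two-pointer while-loop becomes recursion on the two suffixes with accumulator total
def pvMergeCount : Int → List (String × Int) → List (String × Int) → Int
  | total, [], _ => total
  | total, _ :: _, [] => total
  | total, (v1, c1) :: r1, (v2, c2) :: r2 =>
    if v1 < v2 then pvMergeCount total r1 ((v2, c2) :: r2)
    else if v2 < v1 then pvMergeCount total ((v1, c1) :: r1) r2
    else pvMergeCount (total + c1 * c2) r1 r2
termination_by _ r1 r2 => r1.length + r2.length

def calculate_eol_packages_alt (service_entity : List (String × List (String × List String))) (relate_entity_identifier : String) (all_EOL_frameworks : List (List (String × String))) : Int :=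
  let framework_for_entity := (pvLookup ((pvLookup service_entity "relations").getD []) relate_entity_identifier).getD []
  if framework_for_entity = [] then 0
  else
    -- the 'e['identifier']' lookup raises KeyError on a missing key in Python B, just as in A;
    -- Pre_ excludes those inputs, so the filterMap skip is never reached under Pre_
    let eol_ids := PySem.List.sorted (all_EOL_frameworks.filterMap (fun e => pvLookup e "identifier")) (fun x => x) false
    let r1 := pvRuns (PySem.List.sorted framework_for_entity (fun x => x) false)
    let r2 := pvRuns eol_ids
    pvMergeCount 0 r1 r2

-- ===== PRECONDITION & SPEC =====
-- Pre_ excludes exactly the inputs where both Pythons raise KeyError: a non-empty framework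
-- list for the entity combined with some EOL framework dict lacking the 'identifier' key.
def Pre_calculate_eol_packages (service_entity : List (String × List (String × List String))) (relate_entity_identifier : String) (all_EOL_frameworks : List (List (String × String))) : Prop :=
  ((pvLookup ((pvLookup service_entity "relations").getD []) relate_entity_identifier).getD [] = ([] : List String))
  ∨ (all_EOL_frameworks.all (fun eol => (PySem.Dict.mk eol).contains "identifier") = true)
instance (service_entity : List (String × List (String × List String))) (relate_entity_identifier : String) (all_EOL_frameworks : List (List (String × String))) : Decidable (Pre_calculate_eol_packages service_entity relate_entity_identifier all_EOL_frameworks) := by unfold Pre_calculate_eol_packages; infer_instance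

def pvWitness_calculate_eol_packages : (List (String × List (String × List String))) × String × (List (List (String × String))) :=
  ([("relations", [("r", ["x", "y", "x"])])], "r", [[("identifier", "x")], [("identifier", "x")]])

def Spec_calculate_eol_packages (service_entity : List (String × List (String × List String))) (relate_entity_identifier : String) (all_EOL_frameworks : List (List (String × String))) (out : Int) : Prop := out = calculate_eol_packages_alt service_entity relate_entity_identifier all_EOL_frameworks
instance (service_entity : List (String × List (String × List String))) (relate_entity_identifier : String) (all_EOL_frameworks : List (List (String × String))) (out : Int) : Decidable (Spec_calculate_eol_packages service_entity relate_entity_identifier all_EOL_frameworks out) := by unfold Spec_calculate_eol_packages; infer_instance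

-- ===== CLAIM (what is proved, stated in full; the proofs are below) =====
def Claim_equal_calculate_eol_packages : Prop := ∀ (service_entity : List (String × List (String × List String))) (relate_entity_identifier : String) (all_EOL_frameworks : List (List (String × String))), Dom_calculate_eol_packages service_entity relate_entity_identifier all_EOL_frameworks → Pre_calculate_eol_packages service_entity relate_entity_identifier all_EOL_frameworks → Spec_calculate_eol_packages service_entity relate_entity_identifier all_EOL_frameworks (calculate_eol_packages service_entity relate_entity_identifier all_EOL_frameworks)

-- ===== LEMMAS AND PROOFS =====

-- the contribution of a run list r2 at a key v
def pvW (v : String) (r2 : List (String × Int)) : Int :=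
  (r2.map (fun p => if p.1 = v then p.2 else 0)).sum

lemma pvW_cons (v v2 : String) (c2 : Int) (r2 : List (String × Int)) :
    pvW v ((v2, c2) :: r2) = (if v2 = v then c2 else 0) + pvW v r2 := by
  simp [pvW]

lemma pvW_eq_zero (v : String) (r2 : List (String × Int)) (h : ∀ p ∈ r2, p.1 ≠ v) :
    pvW v r2 = 0 := by
  rw [pvW]
  apply List.sum_eq_zero
  intro x hx
  rw [List.mem_map] at hx
  obtain ⟨p, hp, rfl⟩ := hx
  simp [h p hp]

-- A's inner scan adds the multiplicity of foe among the present identifiers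
lemma innerA (l : List (List (String × String))) (acc : Int) (foe : String) :
    l.foldl (fun acc2 eol =>
      match pvLookup eol "identifier" with
      | some v => if foe = v then acc2 + 1 else acc2
      | none => acc2) acc
    = acc + ((l.filterMap (fun eol => pvLookup eol "identifier")).count foe : Int) := by
  induction l generalizing acc with
  | nil => simp
  | cons e l ih =>
    simp only [List.foldl_cons, List.filterMap_cons]
    cases h : pvLookup e "identifier" with
    | none => simp [ih]
    | some v =>
      simp only [ih, List.count_cons]
      by_cases hv : foe = v
      · subst hv; simp; ring
      · have hbv : (v == foe) = false := by
          simp only [beq_eq_false_iff_ne]; exact fun e => hv e.symm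
        simp [if_neg hv, hbv]

-- run-length encoding preserves the weighted sum over the list
lemma runsGo_sum (g : String → Int) (xs : List String) (cur : String) (cnt : Int) :
    ((pvRunsGo cur cnt xs).map (fun p => p.2 * g p.1)).sum = cnt * g cur + (xs.map g).sum := by
  induction xs generalizing cur cnt with
  | nil => simp [pvRunsGo]
  | cons x xs ih =>
    by_cases h : x = cur
    · subst h; simp [pvRunsGo, ih]; ring
    · simp [pvRunsGo, h, ih]

lemma outer_fold (l : List String) (f : Int → String → Int) (g : String → Int)
    (h : ∀ x ∈ l, ∀ acc, f acc x = acc + g x) (c : Int) :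
    l.foldl f c = c + (l.map g).sum := by
  induction l generalizing c with
  | nil => simp
  | cons x xs ih =>
    rw [List.foldl_cons, h x (by simp) c, ih (fun y hy => h y (by simp [hy]))]
    simp only [List.map_cons, List.sum_cons]
    ring

lemma runs_sum (g : String → Int) (l : List String) :
    ((pvRuns l).map (fun p => p.2 * g p.1)).sum = (l.map g).sum := by
  cases l with
  | nil => simp [pvRuns]
  | cons x xs => simp [pvRuns, runsGo_sum]

-- pvW against a run list equals the multiset count in the underlying list
lemma sum_indicator_eq_count (l : List String) (v : String) :
    (l.map (fun x => if x = v then (1 : Int) else 0)).sum = (l.count v : Int) := by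
  induction l with
  | nil => simp
  | cons x l ih =>
    by_cases h : x = v
    · subst h; simp [ih]; ring
    · have hb : (x == v) = false := by simp [h]
      simp [ih, h]

lemma pvW_runs (l : List String) (v : String) :
    pvW v (pvRuns l) = (l.count v : Int) := by
  have he : (fun p : String × Int => if p.1 = v then p.2 else 0)
      = (fun p : String × Int => p.2 * (if p.1 = v then (1 : Int) else 0)) := by
    funext p; by_cases h : p.1 = v <;> simp [h]
  rw [pvW, he, runs_sum (fun x => if x = v then (1 : Int) else 0) l,
    sum_indicator_eq_count]

-- keys of the run-length encoding of a sorted list are strictly increasing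
lemma runsGo_keys (xs : List String) (cur : String) (cnt : Int)
    (hle : ∀ y ∈ xs, cur ≤ y) (hs : xs.Pairwise (· ≤ ·)) :
    (pvRunsGo cur cnt xs).Pairwise (fun p q => p.1 < q.1)
    ∧ ∀ p ∈ pvRunsGo cur cnt xs, cur ≤ p.1 := by
  induction xs generalizing cur cnt with
  | nil => simp [pvRunsGo]
  | cons x xs ih =>
    rcases List.pairwise_cons.mp hs with ⟨hx, hs'⟩
    by_cases h : x = cur
    · subst h
      simpa [pvRunsGo] using ih x (cnt + 1) hx hs'
    · have hcx : cur < x := lt_of_le_of_ne (hle x (by simp)) (fun e => h e.symm)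
      obtain ⟨hp, hall⟩ := ih x 1 hx hs'
      constructor
      · simp only [pvRunsGo, if_neg h]
        exact List.pairwise_cons.mpr ⟨fun q hq => lt_of_lt_of_le hcx (hall q hq), hp⟩
      · intro p hp'
        simp only [pvRunsGo, if_neg h, List.mem_cons] at hp'
        rcases hp' with rfl | hp'
        · exact le_refl _
        · exact le_of_lt (lt_of_lt_of_le hcx (hall p hp'))

lemma runs_keys_of_sorted (l : List String) (h : l.Pairwise (· ≤ ·)) :
    (pvRuns l).Pairwise (fun p q => p.1 < q.1) := by
  cases l with
  | nil => simp [pvRuns]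
  | cons x xs =>
    rcases List.pairwise_cons.mp h with ⟨hx, hs'⟩
    exact (runsGo_keys xs x 1 hx hs').1

-- the two-pointer merge computes the weighted sum of pvW over the first run list
lemma mergeCount_spec (t : Int) (r1 r2 : List (String × Int))
    (h1 : r1.Pairwise (fun p q => p.1 < q.1)) (h2 : r2.Pairwise (fun p q => p.1 < q.1)) :
    pvMergeCount t r1 r2 = t + (r1.map (fun p => p.2 * pvW p.1 r2)).sum := by
  induction t, r1, r2 using pvMergeCount.induct with
  | case1 t r2 => simp [pvMergeCount]
  | case2 t p r1 => simp [pvMergeCount, pvW]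
  | case3 t v1 c1 r1 v2 c2 r2 hlt ih =>
    rcases List.pairwise_cons.mp h1 with ⟨ha1, h1'⟩
    rcases List.pairwise_cons.mp h2 with ⟨ha2, h2'⟩
    rw [pvMergeCount, if_pos hlt, ih h1' h2]
    have hW : pvW v1 ((v2, c2) :: r2) = 0 := by
      rw [pvW_cons, if_neg (ne_of_gt hlt),
        pvW_eq_zero v1 r2 (fun p hp => ne_of_gt (lt_trans hlt (ha2 p hp)))]
      simp
    simp [hW]
  | case4 t v1 c1 r1 v2 c2 r2 hnlt hlt ih =>
    rcases List.pairwise_cons.mp h2 with ⟨ha2, h2'⟩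
    rw [pvMergeCount, if_neg hnlt, if_pos hlt, ih h1 h2']
    have hcong : ∀ p ∈ (v1, c1) :: r1, p.2 * pvW p.1 ((v2, c2) :: r2) = p.2 * pvW p.1 r2 := by
      intro p hp
      have hv2p : v2 < p.1 := by
        rcases List.mem_cons.mp hp with rfl | hp'
        · exact hlt
        · exact lt_trans hlt ((List.pairwise_cons.mp h1).1 p hp')
      rw [pvW_cons, if_neg (ne_of_lt hv2p)]
      simp
    rw [List.map_congr_left hcong]
  | case5 t v1 c1 r1 v2 c2 r2 hnlt hnlt' ih =>
    have hv : v1 = v2 := le_antisymm (not_lt.mp hnlt') (not_lt.mp hnlt)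
    subst hv
    rcases List.pairwise_cons.mp h1 with ⟨ha1, h1'⟩
    rcases List.pairwise_cons.mp h2 with ⟨ha2, h2'⟩
    rw [pvMergeCount, if_neg hnlt, if_neg hnlt', ih h1' h2']
    simp only [List.map_cons, List.sum_cons]
    have hW1 : pvW v1 ((v1, c2) :: r2) = c2 := by
      rw [pvW_cons, if_pos rfl,
        pvW_eq_zero v1 r2 (fun p hp => ne_of_gt (ha2 p hp))]
      simp
    have hcong : ∀ p ∈ r1, p.2 * pvW p.1 ((v1, c2) :: r2) = p.2 * pvW p.1 r2 := by
      intro p hp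
      rw [pvW_cons, if_neg (ne_of_lt (ha1 p hp))]
      simp
    rw [List.map_congr_left hcong, hW1]
    ring

-- ===== VERDICT (by name: the statement is the Claim_ definition above) =====
theorem calculate_eol_packages_spec : Claim_equal_calculate_eol_packages := by
  intro se rid fws _hd _hp
  unfold Spec_calculate_eol_packages calculate_eol_packages calculate_eol_packages_alt
  set fwe := (pvLookup ((pvLookup se "relations").getD []) rid).getD [] with hfwe
  by_cases hf : fwe = []
  · simp [hf]
  · rw [if_neg hf]
    set ids0 := fws.filterMap (fun e => pvLookup e "identifier") with hids0
    set s1 := PySem.List.sorted fwe (fun x => x) false with hs1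
    set s2 := PySem.List.sorted ids0 (fun x => x) false with hs2
    have hp1 : s1.Pairwise (· ≤ ·) := by
      simpa using PySem.List.sorted_pairwise fwe (fun x => x)
    have hp2 : s2.Pairwise (· ≤ ·) := by
      simpa using PySem.List.sorted_pairwise ids0 (fun x => x)
    rw [mergeCount_spec 0 _ _ (runs_keys_of_sorted s1 hp1) (runs_keys_of_sorted s2 hp2)]
    have hstep : ∀ p ∈ pvRuns s1, p.2 * pvW p.1 (pvRuns s2) = p.2 * (ids0.count p.1 : Int) := by
      intro p _
      rw [pvW_runs, (PySem.List.sorted_perm ids0 (fun x => x) false).count_eq]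
    rw [List.map_congr_left hstep, runs_sum (fun x => (ids0.count x : Int)) s1]
    have hpermsum : (s1.map (fun x => (ids0.count x : Int))).sum
        = (fwe.map (fun x => (ids0.count x : Int))).sum :=
      ((PySem.List.sorted_perm fwe (fun x => x) false).map _).sum_eq
    rw [hpermsum]
    have hA : fwe.foldl (fun acc foe =>
        fws.foldl (fun acc2 eol =>
          match pvLookup eol "identifier" with
          | some v => if foe = v then acc2 + 1 else acc2
          | none => acc2) acc) 0
        = (fwe.map (fun x => (ids0.count x : Int))).sum := by
      have hcg : ∀ x ∈ fwe, ∀ acc : Int,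
          fws.foldl (fun acc2 eol =>
            match pvLookup eol "identifier" with
            | some v => if x = v then acc2 + 1 else acc2
            | none => acc2) acc
          = acc + (ids0.count x : Int) := fun x _ acc => innerA fws acc x
      rw [outer_fold fwe _ (fun x => (ids0.count x : Int)) hcg 0]
      simp
    rw [hA]
    ring
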